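-- pv_equiv track=rewrite | github.com/jdy163/TexasPoker | TexasPoker.py | sta
-- ===== SOURCE A (Python) =====
-- def higher_than(value1, value2):
--     order = "23456789TJQKA"
--     if order.index(value1) > order.index(value2):
--         return 1
--     if order.index(value1) < order.index(value2):
--         return 0
--     if order.index(value1) == order.index(value2):
--         return 2
--
-- def sta(values):
--     new_values = []
--     numbers = []
--     for value in values:
--         if value not in new_values:
--             new_values.append(value)
--             numbers.append(1)
--         else:
--             numbers[new_values.index(value)] += 1
--     for i in range(len(new_values)):
--         for j in range(i + 1, len(new_values)):
--             if numbers[i] < numbers[j]: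
--                 new_values[i], new_values[j] = new_values[j], new_values[i]
--                 numbers[i], numbers[j] = numbers[j], numbers[i]
--             if numbers[i] == numbers[j] and higher_than(new_values[i], new_values[j]) == 0:
--                 new_values[i], new_values[j] = new_values[j], new_values[i]
--                 numbers[i], numbers[j] = numbers[j], numbers[i]
--     return new_values, numbers
-- ===== SOURCE B (Python) =====
-- def sta(values):
--     order = "23456789TJQKA"
--     counts = {}
--     for v in values:
--         counts[v] = counts.get(v, 0) + 1
--     items = sorted(counts.items(), key=lambda kv: (-kv[1], -order.find(kv[0])))
--     return [v for v, _ in items], [n for _, n in items]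
-- ===== Notes on version B (the rewrite author's own statement) =====
-- stated objective: simpler
-- what changed: Replaces A's quadratic membership/index counting scans and hand-written selection-sort double loop with a single dict frequency pass followed by one sorted() call keyed by (-count, -rank-position).
import Mathlib
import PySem

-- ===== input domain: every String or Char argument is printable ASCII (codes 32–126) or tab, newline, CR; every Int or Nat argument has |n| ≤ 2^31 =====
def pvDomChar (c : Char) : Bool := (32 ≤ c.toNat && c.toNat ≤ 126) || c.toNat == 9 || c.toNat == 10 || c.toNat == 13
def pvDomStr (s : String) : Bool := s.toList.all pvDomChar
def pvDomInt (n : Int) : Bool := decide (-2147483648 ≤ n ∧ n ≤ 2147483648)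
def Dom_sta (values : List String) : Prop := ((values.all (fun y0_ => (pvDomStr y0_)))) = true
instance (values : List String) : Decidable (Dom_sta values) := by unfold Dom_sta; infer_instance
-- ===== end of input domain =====

-- B replaces A's quadratic membership/index counting scans and hand-written selection-sort double
-- loop by a dict frequency pass plus one sorted() call keyed by (-count, -rank-position).

-- ===== PORT A =====
-- helper higher_than; Python's str.index raises ValueError exactly where str.find returns -1:
-- ported with find, returning none for the raise
def higherThan (value1 value2 : String) : Option Int :=
  let order := "23456789TJQKA"
  let i1 := PySem.Str.find order value1
  let i2 := PySem.Str.find order value2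
  if i1 = -1 ∨ i2 = -1 then none
  else if i1 > i2 then some 1
  else if i1 < i2 then some 0
  else some 2

-- the body of A's double loop: the two conditional simultaneous swaps at positions i and j
-- (first if: counts strictly less; second if, on the updated state: counts equal and lower rank)
def staSwapLess (st : List String × List Int) (i j : Int) : List String × List Int :=
  if PySem.List.pyGetD st.2 i 0 < PySem.List.pyGetD st.2 j 0 then
    (PySem.List.pySetD (PySem.List.pySetD st.1 i (PySem.List.pyGetD st.1 j "")) j
       (PySem.List.pyGetD st.1 i ""),
     PySem.List.pySetD (PySem.List.pySetD st.2 i (PySem.List.pyGetD st.2 j 0)) j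
       (PySem.List.pyGetD st.2 i 0))
  else st

def staSwapTie (st : List String × List Int) (i j : Int) : List String × List Int :=
  if PySem.List.pyGetD st.2 i 0 = PySem.List.pyGetD st.2 j 0 ∧
     higherThan (PySem.List.pyGetD st.1 i "") (PySem.List.pyGetD st.1 j "") = some 0 then
    (PySem.List.pySetD (PySem.List.pySetD st.1 i (PySem.List.pyGetD st.1 j "")) j
       (PySem.List.pyGetD st.1 i ""),
     PySem.List.pySetD (PySem.List.pySetD st.2 i (PySem.List.pyGetD st.2 j 0)) j
       (PySem.List.pyGetD st.2 i 0))
  else st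

def staSwap (st : List String × List Int) (i j : Int) : List String × List Int :=
  staSwapTie (staSwapLess st i j) i j

def sta (values : List String) : List String × List Int :=
  let st := values.foldl (fun st value =>
    if !st.1.contains value then (st.1 ++ [value], st.2 ++ [(1 : Int)])
    else  -- numbers[new_values.index(value)] += 1 (the index exists: value ∈ new_values)
      match PySem.List.index? st.1 value with
      | some i => (st.1, st.2.set i (st.2.getD i 0 + 1))
      | none => st) (([], []) : List String × List Int)
  let n : Int := st.1.length
  (PySem.List.pyRange 0 n 1).foldl (fun st i =>
    (PySem.List.pyRange (i + 1) n 1).foldl (fun st j => staSwap st i j) st) st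

-- ===== PORT B =====
def sta_alt (values : List String) : List String × List Int :=
  let counts := values.foldl (fun d v => d.insert v (d.getD v 0 + 1))
    (PySem.Dict.empty : PySem.Dict String Int)
  let items := PySem.List.sorted2 counts.items
    (fun kv => -kv.2) (fun kv => -(PySem.Str.find "23456789TJQKA" kv.1)) false
  (items.map (fun kv => kv.1), items.map (fun kv => kv.2))

-- ===== PRECONDITION & SPEC =====
-- Pre_ excludes (a) inputs where A raises ValueError (two distinct equally-frequent values with one
-- not a substring of the rank string), and (b) the accidental-corner ties where two distinct
-- equally-frequent values share the same first position in the rank string (e.g. '2' and '23'),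
-- on which the order among them is underdetermined and A's unstable selection sort and B's stable
-- sort may legitimately differ.
def Pre_sta (values : List String) : Prop :=
  ∀ v ∈ values, ∀ w ∈ values, v ≠ w → values.count v = values.count w →
    PySem.Str.find "23456789TJQKA" v ≠ -1 ∧ PySem.Str.find "23456789TJQKA" w ≠ -1 ∧
    PySem.Str.find "23456789TJQKA" v ≠ PySem.Str.find "23456789TJQKA" w
instance (values : List String) : Decidable (Pre_sta values) := by unfold Pre_sta; infer_instance

def pvWitness_sta : List String := ["A", "K", "A", "2", "K", "A"]

def Spec_sta (values : List String) (out : List String × List Int) : Prop := out = sta_alt values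
instance (values : List String) (out : List String × List Int) : Decidable (Spec_sta values out) := by
  unfold Spec_sta; infer_instance

-- ===== CLAIM (what is proved, stated in full; the proofs are below) =====
def Claim_equal_sta : Prop := ∀ (values : List String), Dom_sta values → Pre_sta values →
  Spec_sta values (sta values)
-- ===== LEMMAS AND PROOFS =====

-- rank position (total form of order.index via find)
def fnd (v : String) : Int := PySem.Str.find "23456789TJQKA" v

-- the sort key A's comparisons implement: (count, rank position), compared lexicographically
def pkey (c : String → Int) (v : String) : Int ×ₗ Int := toLex (c v, fnd v)

-- the combined swap condition of A's two ifs
def pcond (c : String → Int) (x y : String) : Bool :=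
  decide (c x < c y) || (decide (c x = c y) && decide (higherThan x y = some 0))

def pswap (m : List String) (i j : Int) : List String :=
  PySem.List.pySetD (PySem.List.pySetD m i (PySem.List.pyGetD m j "")) j (PySem.List.pyGetD m i "")

def pstep (c : String → Int) (i j : Int) (m : List String) : List String :=
  if pcond c (PySem.List.pyGetD m i "") (PySem.List.pyGetD m j "") then pswap m i j else m

-- one inner pass: extract the champion, keep the losers in position order
def selOne (c : String → Int) (x : String) : List String → String × List String
  | [] => (x, [])
  | y :: ys =>
    if pcond c x y then ((selOne c y ys).1, x :: (selOne c y ys).2)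
    else ((selOne c x ys).1, y :: (selOne c x ys).2)

lemma selOne_len (c : String → Int) : ∀ (s : List String) (x : String),
    (selOne c x s).2.length = s.length := by
  intro s; induction s with
  | nil => intro x; simp [selOne]
  | cons y ys ih => intro x; by_cases h : pcond c x y <;> simp [selOne, h, ih]

def ssort (c : String → Int) : List String → List String
  | [] => []
  | x :: xs => (selOne c x xs).1 :: ssort c (selOne c x xs).2
  termination_by s => s.length
  decreasing_by simp [selOne_len]

lemma length_pswap (m : List String) (i j : Int) : (pswap m i j).length = m.length := by
  simp [pswap]

lemma length_pstep (c : String → Int) (i j : Int) (m : List String) :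
    (pstep c i j m).length = m.length := by
  unfold pstep; split <;> simp [length_pswap]

-- positional helpers: read/write at an index given as the length of the prefix
lemma getD_at {α : Type} (pre rest : List α) (x d : α) :
    (pre ++ x :: rest).getD pre.length d = x := by
  induction pre with
  | nil => rfl
  | cons a pre ih => simpa using ih

lemma set_at {α : Type} (pre rest : List α) (x v : α) :
    (pre ++ x :: rest).set pre.length v = pre ++ v :: rest := by
  induction pre with
  | nil => rfl
  | cons a pre ih => simpa using ih

lemma pyGetD_at (pre rest : List String) (x d : String) (k : Int) (hk : k = (pre.length : Int)) :
    PySem.List.pyGetD (pre ++ x :: rest) k d = x := by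
  subst hk; rw [PySem.List.pyGetD_natCast]; exact getD_at pre rest x d

lemma pySetD_at {α : Type} (pre rest : List α) (x v : α) (k : Int) (hk : k = (pre.length : Int)) :
    PySem.List.pySetD (pre ++ x :: rest) k v = pre ++ v :: rest := by
  subst hk; rw [PySem.List.pySetD_natCast]; exact set_at pre rest x v


lemma staSwapLess_mk (a : List String) (b : List Int) (i j : Int) :
    staSwapLess (a, b) i j
      = if PySem.List.pyGetD b i 0 < PySem.List.pyGetD b j 0 then
          (PySem.List.pySetD (PySem.List.pySetD a i (PySem.List.pyGetD a j "")) j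
             (PySem.List.pyGetD a i ""),
           PySem.List.pySetD (PySem.List.pySetD b i (PySem.List.pyGetD b j 0)) j
             (PySem.List.pyGetD b i 0))
        else (a, b) := rfl

lemma staSwapTie_mk (a : List String) (b : List Int) (i j : Int) :
    staSwapTie (a, b) i j
      = if PySem.List.pyGetD b i 0 = PySem.List.pyGetD b j 0 ∧
           higherThan (PySem.List.pyGetD a i "") (PySem.List.pyGetD a j "") = some 0 then
          (PySem.List.pySetD (PySem.List.pySetD a i (PySem.List.pyGetD a j "")) j
             (PySem.List.pyGetD a i ""),
           PySem.List.pySetD (PySem.List.pySetD b i (PySem.List.pyGetD b j 0)) j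
             (PySem.List.pyGetD b i 0))
        else (a, b) := rfl

lemma step_pair (c : String → Int) (m : List String) (i j : Nat)
    (hij : i < j) (hj : j < m.length) :
    staSwap (m, m.map c) (i : Int) (j : Int)
      = (pstep c (i : Int) (j : Int) m, (pstep c (i : Int) (j : Int) m).map c) := by
  have hi : i < m.length := Nat.lt_trans hij hj
  have hi' : i < (m.map c).length := by simpa using hi
  have hj' : j < (m.map c).length := by simpa using hj
  have gsi : PySem.List.pyGetD m (i : Int) "" = m[i] := by
    rw [PySem.List.pyGetD_natCast, List.getD_eq_getElem _ _ hi]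
  have gsj : PySem.List.pyGetD m (j : Int) "" = m[j] := by
    rw [PySem.List.pyGetD_natCast, List.getD_eq_getElem _ _ hj]
  have gni : PySem.List.pyGetD (m.map c) (i : Int) 0 = c m[i] := by
    rw [PySem.List.pyGetD_natCast, List.getD_eq_getElem _ _ hi']; simp
  have gnj : PySem.List.pyGetD (m.map c) (j : Int) 0 = c m[j] := by
    rw [PySem.List.pyGetD_natCast, List.getD_eq_getElem _ _ hj']; simp
  have e1 : PySem.List.pySetD (PySem.List.pySetD (m.map c) (i:Int) (c m[j])) (j:Int) (c m[i])
      = ((m.set i m[j]).set j m[i]).map c := by simp [List.map_set]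
  have e2 : PySem.List.pySetD (PySem.List.pySetD m (i:Int) m[j]) (j:Int) m[i]
      = (m.set i m[j]).set j m[i] := by simp
  rw [show staSwap (m, m.map c) (i:Int) (j:Int)
      = staSwapTie (staSwapLess (m, m.map c) (i:Int) (j:Int)) (i:Int) (j:Int) from rfl]
  by_cases hlt : c m[i] < c m[j]
  · -- first if fires; the second cannot (the counts are now strictly decreasing)
    have hr : pstep c (i : Int) (j : Int) m = (m.set i m[j]).set j m[i] := by
      unfold pstep pswap
      rw [gsi, gsj, if_pos (by simp [pcond, hlt]), e2]
    have hless : staSwapLess (m, m.map c) (i:Int) (j:Int)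
        = ((m.set i m[j]).set j m[i], ((m.set i m[j]).set j m[i]).map c) := by
      rw [staSwapLess_mk, gni, gnj, if_pos hlt, gsi, gsj, e1, e2]
    have g2i : PySem.List.pyGetD (((m.set i m[j]).set j m[i]).map c) (i:Int) 0 = c m[j] := by
      rw [PySem.List.pyGetD_natCast, List.getD_eq_getElem _ _ (by simpa using hi)]
      simp [List.getElem_set_ne (by omega : j ≠ i), List.getElem_set_self]
    have g2j : PySem.List.pyGetD (((m.set i m[j]).set j m[i]).map c) (j:Int) 0 = c m[i] := by
      rw [PySem.List.pyGetD_natCast, List.getD_eq_getElem _ _ (by simpa using hj)]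
      simp
    rw [hless, staSwapTie_mk, g2i, g2j, if_neg (fun h => absurd h.1 (by omega)), hr]
  · have hless : staSwapLess (m, m.map c) (i:Int) (j:Int) = (m, m.map c) := by
      rw [staSwapLess_mk, gni, gnj, if_neg hlt]
    rw [hless, staSwapTie_mk, gni, gnj, gsi, gsj]
    by_cases h2 : c m[i] = c m[j] ∧ higherThan m[i] m[j] = some 0
    · have hr : pstep c (i : Int) (j : Int) m = (m.set i m[j]).set j m[i] := by
        unfold pstep pswap
        rw [gsi, gsj, if_pos (by simp [pcond, h2.1, h2.2]), e2]
      rw [if_pos h2, hr, e1, e2]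
    · have hr : pstep c (i : Int) (j : Int) m = m := by
        unfold pstep
        rw [gsi, gsj, if_neg (by simp [pcond, hlt]; intro hc hh; exact h2 ⟨hc, hh⟩)]
      rw [if_neg h2, hr]

lemma foldl_pstep_length (c : String → Int) :
    ∀ (r : List Int) (i : Int) (m : List String),
      (r.foldl (fun m j => pstep c i j m) m).length = m.length := by
  intro r; induction r with
  | nil => intro i m; rfl
  | cons j r ih => intro i m; simp only [List.foldl_cons]; rw [ih, length_pstep]

lemma fold_lift (c : String → Int) (i : Int) (hi : 0 ≤ i) :
    ∀ (r : List Int) (m : List String), (∀ j ∈ r, i < j ∧ j < (m.length : Int)) →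
    r.foldl (fun st j => staSwap st i j) (m, m.map c)
      = (r.foldl (fun m j => pstep c i j m) m, (r.foldl (fun m j => pstep c i j m) m).map c) := by
  intro r; induction r with
  | nil => intro m _; rfl
  | cons j r ih =>
    intro m hb
    obtain ⟨hij, hjl⟩ := hb j (List.mem_cons_self)
    have hj0 : 0 ≤ j := le_trans hi (le_of_lt hij)
    have hstep : staSwap (m, m.map c) i j = (pstep c i j m, (pstep c i j m).map c) := by
      rw [show i = ((i.toNat : Nat) : Int) by omega, show j = ((j.toNat : Nat) : Int) by omega]
      exact step_pair c m i.toNat j.toNat (by omega) (by omega)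
    simp only [List.foldl_cons]
    rw [hstep]
    exact ih (pstep c i j m) (fun x hx => by
      obtain ⟨h1, h2⟩ := hb x (List.mem_cons_of_mem _ hx)
      exact ⟨h1, by rw [length_pstep]; exact h2⟩)

lemma outer_lift (c : String → Int) (n : Int) :
    ∀ (r : List Int) (m : List String), (∀ i ∈ r, 0 ≤ i) → ((m.length : Int) = n) →
    r.foldl (fun st i => (PySem.List.pyRange (i+1) n 1).foldl (fun st j => staSwap st i j) st) (m, m.map c)
      = (r.foldl (fun m i => (PySem.List.pyRange (i+1) n 1).foldl (fun m j => pstep c i j m) m) m,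
         (r.foldl (fun m i => (PySem.List.pyRange (i+1) n 1).foldl (fun m j => pstep c i j m) m) m).map c) := by
  intro r; induction r with
  | nil => intro m _ _; rfl
  | cons i r ih =>
    intro m h0 hn
    simp only [List.foldl_cons]
    rw [fold_lift c i (h0 i List.mem_cons_self) _ m (fun j hj => by
      rw [PySem.List.mem_pyRange_one] at hj
      exact ⟨by omega, by omega⟩)]
    exact ih _ (fun x hx => h0 x (List.mem_cons_of_mem _ hx))
      (by rw [foldl_pstep_length]; exact hn)


lemma inner_go (c : String → Int) :
    ∀ (suf mid pre : List String) (x : String) (ii a b : Int),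
      ii = (pre.length : Int) →
      a = (pre.length : Int) + 1 + (mid.length : Int) →
      b = a + (suf.length : Int) →
      (PySem.List.pyRange a b 1).foldl (fun m j => pstep c ii j m) (pre ++ x :: (mid ++ suf))
        = pre ++ (selOne c x suf).1 :: (mid ++ (selOne c x suf).2) := by
  intro suf
  induction suf with
  | nil =>
    intro mid pre x ii a b hii ha hb
    rw [PySem.List.pyRange_one_eq_nil (by simp at hb; omega)]
    simp [selOne]
  | cons y suf ih =>
    intro mid pre x ii a b hii ha hb
    rw [PySem.List.pyRange_one_cons (by simp at hb; omega)]
    simp only [List.foldl_cons]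
    have hxget : PySem.List.pyGetD (pre ++ x :: (mid ++ y :: suf)) ii "" = x :=
      pyGetD_at _ _ _ _ _ hii
    have hyget : PySem.List.pyGetD (pre ++ x :: (mid ++ y :: suf)) a "" = y := by
      rw [show pre ++ x :: (mid ++ y :: suf) = (pre ++ x :: mid) ++ y :: suf by simp]
      exact pyGetD_at _ _ _ _ _ (by simp [ha]; ring)
    have hfirst : pstep c ii a (pre ++ x :: (mid ++ y :: suf))
        = if pcond c x y then pre ++ y :: (mid ++ x :: suf) else pre ++ x :: (mid ++ y :: suf) := by
      unfold pstep pswap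
      rw [hxget, hyget]
      by_cases hc : pcond c x y
      · rw [if_pos hc, if_pos hc]
        rw [pySetD_at pre (mid ++ y :: suf) x y ii hii]
        rw [show pre ++ y :: (mid ++ y :: suf) = (pre ++ y :: mid) ++ y :: suf by simp]
        rw [pySetD_at (pre ++ y :: mid) suf y x a (by simp [ha]; ring)]
        simp
      · rw [if_neg hc, if_neg hc]
    rw [hfirst]
    by_cases hc : pcond c x y
    · rw [if_pos hc]
      rw [show pre ++ y :: (mid ++ x :: suf) = pre ++ y :: ((mid ++ [x]) ++ suf) by simp]
      rw [ih (mid ++ [x]) pre y ii (a + 1) b hii (by simp [ha]; ring) (by simp at hb ⊢; omega)]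
      simp [selOne, hc]
    · rw [if_neg hc]
      rw [show pre ++ x :: (mid ++ y :: suf) = pre ++ x :: ((mid ++ [y]) ++ suf) by simp]
      rw [ih (mid ++ [y]) pre x ii (a + 1) b hii (by simp [ha]; ring) (by simp at hb ⊢; omega)]
      simp [selOne, hc]

lemma outer_go (c : String → Int) :
    ∀ (k : Nat) (suf pre : List String) (s n : Int), suf.length = k →
      s = (pre.length : Int) → n = (pre.length : Int) + (suf.length : Int) →
      (PySem.List.pyRange s n 1).foldl
        (fun m i => (PySem.List.pyRange (i + 1) n 1).foldl (fun m j => pstep c i j m) m)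
        (pre ++ suf)
        = pre ++ ssort c suf := by
  intro k
  induction k with
  | zero =>
    intro suf pre s n hk hs hn
    rw [List.length_eq_zero_iff.mp hk] at hn ⊢
    rw [PySem.List.pyRange_one_eq_nil (by simp at hn; omega)]
    simp [ssort]
  | succ k ih =>
    intro suf pre s n hk hs hn
    obtain ⟨x, suf', rfl⟩ : ∃ x t, suf = x :: t := by
      cases suf with
      | nil => simp at hk
      | cons a t => exact ⟨a, t, rfl⟩
    rw [PySem.List.pyRange_one_cons (by simp at hn; omega)]
    simp only [List.foldl_cons]
    rw [show pre ++ x :: suf' = pre ++ x :: ([] ++ suf') by simp]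
    rw [inner_go c suf' [] pre x s (s + 1) n hs (by simp [hs]) (by simp at hn ⊢; omega)]
    rw [show pre ++ (selOne c x suf').1 :: ([] ++ (selOne c x suf').2)
        = (pre ++ [(selOne c x suf').1]) ++ (selOne c x suf').2 by simp]
    rw [ih (selOne c x suf').2 (pre ++ [(selOne c x suf').1]) (s + 1) n
        (by rw [selOne_len]; simpa using hk)
        (by simp [hs])
        (by rw [selOne_len] at *; simp at hn ⊢; omega)]
    simp [ssort]

lemma count_phase (values : List String) :
    values.foldl (fun st value =>
      if !st.1.contains value then (st.1 ++ [value], st.2 ++ [(1 : Int)])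
      else
        match PySem.List.index? st.1 value with
        | some i => (st.1, st.2.set i (st.2.getD i 0 + 1))
        | none => st) (([], []) : List String × List Int)
    = (PySem.Set.ofList values,
       (PySem.Set.ofList values).map (fun k => (values.count k : Int))) := by
  induction values using List.reverseRecOn with
  | nil => rfl
  | append_singleton xs v ih =>
    rw [List.foldl_append, ih]
    simp only [List.foldl_cons, List.foldl_nil]
    rw [PySem.Set.ofList_append_singleton]
    by_cases hv : v ∈ PySem.Set.ofList xs
    · have hvx : v ∈ xs := (PySem.Set.mem_ofList _ _).mp hv
      rw [if_neg (by simpa using hv)]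
      cases hidx : PySem.List.index? (PySem.Set.ofList xs) v with
      | none =>
        exact absurd ((PySem.List.index?_eq_none_iff _ _).mp hidx) (by simpa using hv)
      | some i =>
        obtain ⟨p, sfx, hSd, hlen, hvp⟩ := (PySem.List.index?_eq_some_iff _ _ _).mp hidx
        have hnd : (PySem.Set.ofList xs).Nodup := PySem.Set.nodup_ofList _
        have hvs : v ∉ sfx := by
          rw [hSd] at hnd
          exact (List.nodup_cons.mp (List.nodup_append.mp hnd).2.1).1
        rw [PySem.Set.add_of_mem hv, hSd]
        simp only [List.map_append, List.map_cons]
        rw [show i = (p.map (fun k => (xs.count k : Int))).length by simp [hlen]]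
        rw [getD_at, set_at]
        have hp : p.map (fun k => ((xs ++ [v]).count k : Int))
            = p.map (fun k => (xs.count k : Int)) := by
          apply List.map_congr_left
          intro a ha
          have hav : ¬ (v == a) := by
            simp only [beq_iff_eq]
            intro h; exact hvp (h ▸ ha)
          simp [List.count_append, List.count_cons, hav]
        have hs : sfx.map (fun k => ((xs ++ [v]).count k : Int))
            = sfx.map (fun k => (xs.count k : Int)) := by
          apply List.map_congr_left
          intro a ha
          have hav : ¬ (v == a) := by
            simp only [beq_iff_eq]
            intro h; exact hvs (h ▸ ha)
          simp [List.count_append, List.count_cons, hav]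
        have hvv : ((xs ++ [v]).count v : Int) = (xs.count v : Int) + 1 := by
          simp [List.count_append]
        rw [hp, hs, hvv]
    · have hvx : v ∉ xs := fun h => hv ((PySem.Set.mem_ofList _ _).mpr h)
      rw [if_pos (by simpa using hv), PySem.Set.add_of_not_mem hv]
      simp only [List.map_append, List.map_cons, List.map_nil]
      have hp : (PySem.Set.ofList xs).map (fun k => ((xs ++ [v]).count k : Int))
          = (PySem.Set.ofList xs).map (fun k => (xs.count k : Int)) := by
        apply List.map_congr_left
        intro a ha
        have hav : ¬ (v == a) := by
          simp only [beq_iff_eq]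
          intro h; exact hvx (h ▸ (PySem.Set.mem_ofList _ _).mp ha)
        simp [List.count_append, List.count_cons, hav]
      have hvv : ((xs ++ [v]).count v : Int) = 1 := by
        simp [List.count_append, List.count_eq_zero.mpr hvx]
      rw [hp, hvv]

lemma outer_go0 (c : String → Int) (L : List String) :
    (PySem.List.pyRange 0 (L.length : Int) 1).foldl
      (fun m i => (PySem.List.pyRange (i + 1) (L.length : Int) 1).foldl (fun m j => pstep c i j m) m)
      L
    = ssort c L := by
  have h := outer_go c L.length L [] 0 (L.length : Int) rfl (by simp) (by simp)
  simpa using h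

lemma sta_eq (values : List String) :
    sta values
      = (ssort (fun k => (values.count k : Int)) (PySem.Set.ofList values),
         (ssort (fun k => (values.count k : Int)) (PySem.Set.ofList values)).map
           (fun k => (values.count k : Int))) := by
  have hdef : sta values
      = (PySem.List.pyRange 0 (((PySem.Set.ofList values).length : Nat) : Int) 1).foldl
          (fun st i =>
            (PySem.List.pyRange (i + 1) (((PySem.Set.ofList values).length : Nat) : Int) 1).foldl
              (fun st j => staSwap st i j) st)
          (PySem.Set.ofList values,
           (PySem.Set.ofList values).map (fun k => (values.count k : Int))) := by
    unfold sta
    rw [count_phase]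
  rw [hdef]
  rw [outer_lift (fun k => (values.count k : Int)) (((PySem.Set.ofList values).length : Nat) : Int)
      _ (PySem.Set.ofList values)
      (fun i hi => by rw [PySem.List.mem_pyRange_one] at hi; omega) rfl]
  rw [outer_go0]

lemma pkey_lt_iff (c : String → Int) (a b : String) :
    pkey c a < pkey c b ↔ (c a < c b ∨ (c a = c b ∧ fnd a < fnd b)) := by
  simp [pkey, Prod.Lex.toLex_lt_toLex]

lemma keyflip (c : String → Int) (a b : String) :
    ((toLex (-(c a), -(fnd a)) : Int ×ₗ Int) < toLex (-(c b), -(fnd b))) ↔ pkey c b < pkey c a := by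
  simp only [pkey, Prod.Lex.toLex_lt_toLex]
  omega

lemma higherThan_iff (v1 v2 : String) :
    (higherThan v1 v2 = some 0)
      ↔ (fnd v1 ≠ -1 ∧ fnd v2 ≠ -1 ∧ fnd v1 < fnd v2) := by
  simp only [higherThan, fnd]
  split_ifs with h1 h2 h3
  · exact iff_of_false (by simp) (by omega)
  · exact iff_of_false (by simp) (by omega)
  · exact iff_of_true rfl (by omega)
  · exact iff_of_false (by simp) (by omega)

lemma selOne_perm (c : String → Int) :
    ∀ (s : List String) (x : String),
      ((selOne c x s).1 :: (selOne c x s).2).Perm (x :: s) := by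
  intro s
  induction s with
  | nil => intro x; simp [selOne]
  | cons y ys ih =>
    intro x
    by_cases hc : pcond c x y
    · simp only [selOne, hc, if_true]
      exact (List.Perm.swap x (selOne c y ys).1 (selOne c y ys).2).trans ((ih y).cons x)
    · simp only [selOne, hc]
      exact ((List.Perm.swap y (selOne c x ys).1 (selOne c x ys).2).trans
        ((ih x).cons y)).trans (List.Perm.swap x y ys)

lemma selOne_max (c : String → Int) (L : List String)
    (Hiff : ∀ a ∈ L, ∀ b ∈ L, (pcond c a b = true ↔ pkey c a < pkey c b)) :
    ∀ (s : List String) (x : String), x ∈ L → (∀ z ∈ s, z ∈ L) →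
      pkey c x ≤ pkey c (selOne c x s).1 ∧
      ∀ z ∈ (selOne c x s).2, pkey c z ≤ pkey c (selOne c x s).1 := by
  intro s
  induction s with
  | nil => intro x hx _; simp [selOne]
  | cons y ys ih =>
    intro x hx hs
    have hy : y ∈ L := hs y List.mem_cons_self
    have hys : ∀ z ∈ ys, z ∈ L := fun z hz => hs z (List.mem_cons_of_mem _ hz)
    by_cases hc : pcond c x y
    · have hxy : pkey c x < pkey c y := (Hiff x hx y hy).mp hc
      obtain ⟨h1, h2⟩ := ih y hy hys
      simp only [selOne, hc, if_true]
      refine ⟨le_trans (le_of_lt hxy) h1, ?_⟩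
      intro z hz
      rcases List.mem_cons.mp hz with rfl | hz
      · exact le_trans (le_of_lt hxy) h1
      · exact h2 z hz
    · have hxy : ¬ pkey c x < pkey c y := fun h => hc ((Hiff x hx y hy).mpr h)
      obtain ⟨h1, h2⟩ := ih x hx hys
      simp only [selOne, hc]
      refine ⟨h1, ?_⟩
      intro z hz
      rcases List.mem_cons.mp hz with rfl | hz
      · exact le_trans (le_of_not_gt hxy) h1
      · exact h2 z hz

lemma ssort_perm (c : String → Int) :
    ∀ (k : Nat) (s : List String), s.length = k → (ssort c s).Perm s := by
  intro k
  induction k with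
  | zero => intro s hk; rw [List.length_eq_zero_iff.mp hk]; simp [ssort]
  | succ k ih =>
    intro s hk
    obtain ⟨x, xs, rfl⟩ : ∃ x t, s = x :: t := by
      cases s with
      | nil => simp at hk
      | cons a t => exact ⟨a, t, rfl⟩
    simp only [ssort]
    have hR : (selOne c x xs).2.length = k := by rw [selOne_len]; simpa using hk
    exact ((ih _ hR).cons (selOne c x xs).1).trans (selOne_perm c xs x)

lemma ssort_pairwise (c : String → Int) (L : List String)
    (Hiff : ∀ a ∈ L, ∀ b ∈ L, (pcond c a b = true ↔ pkey c a < pkey c b))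
    (Hinj : ∀ a ∈ L, ∀ b ∈ L, pkey c a = pkey c b → a = b) :
    ∀ (k : Nat) (s : List String), s.length = k → (∀ z ∈ s, z ∈ L) → s.Nodup →
      (ssort c s).Pairwise (fun a b => pkey c b < pkey c a) := by
  intro k
  induction k with
  | zero => intro s hk _ _; rw [List.length_eq_zero_iff.mp hk]; simp [ssort]
  | succ k ih =>
    intro s hk hs hnd
    obtain ⟨x, xs, rfl⟩ : ∃ x t, s = x :: t := by
      cases s with
      | nil => simp at hk
      | cons a t => exact ⟨a, t, rfl⟩
    simp only [ssort]
    have hperm : ((selOne c x xs).1 :: (selOne c x xs).2).Perm (x :: xs) := selOne_perm c xs x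
    have hmemL : ∀ z ∈ (selOne c x xs).1 :: (selOne c x xs).2, z ∈ L :=
      fun z hz => hs z (hperm.subset hz)
    have hnd2 : ((selOne c x xs).1 :: (selOne c x xs).2).Nodup := hperm.nodup_iff.mpr hnd
    have hR : (selOne c x xs).2.length = k := by rw [selOne_len]; simpa using hk
    have hmax := selOne_max c L Hiff xs x (hs x List.mem_cons_self)
      (fun z hz => hs z (List.mem_cons_of_mem _ hz))
    refine List.Pairwise.cons ?_ (ih _ hR
      (fun z hz => hmemL z (List.mem_cons_of_mem _ hz))
      (List.nodup_cons.mp hnd2).2)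
    intro b hb
    have hbR : b ∈ (selOne c x xs).2 := (ssort_perm c k _ hR).subset hb
    have hle : pkey c b ≤ pkey c (selOne c x xs).1 := hmax.2 b hbR
    have hne : b ≠ (selOne c x xs).1 := by
      intro h; exact (List.nodup_cons.mp hnd2).1 (h ▸ hbR)
    exact lt_of_le_of_ne hle (fun h => hne
      (Hinj b (hmemL b (List.mem_cons_of_mem _ hbR)) _ (hmemL _ List.mem_cons_self) h))

lemma sorted2_eq_sorted_lex (xs : List (String × Int)) (k1 k2 : (String × Int) → Int) :
    PySem.List.sorted2 xs k1 k2 false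
      = PySem.List.sorted xs (fun x => (toLex (k1 x, k2 x) : Int ×ₗ Int)) false := by
  rw [PySem.List.sorted_eq_foldl_insertBy]
  show xs.foldl (fun acc x => PySem.List.insertBy
      (fun a b => decide (k1 a < k1 b) || (!decide (k1 b < k1 a) && decide (k2 a < k2 b))) x acc) []
    = xs.foldl (fun acc x => PySem.List.insertBy
      (fun a b => decide ((fun x => (toLex (k1 x, k2 x) : Int ×ₗ Int)) a
                        < (fun x => (toLex (k1 x, k2 x) : Int ×ₗ Int)) b)) x acc) []
  have hfn : (fun (a b : String × Int) =>
        decide (k1 a < k1 b) || (!decide (k1 b < k1 a) && decide (k2 a < k2 b)))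
      = (fun a b => decide ((fun x => (toLex (k1 x, k2 x) : Int ×ₗ Int)) a
                          < (fun x => (toLex (k1 x, k2 x) : Int ×ₗ Int)) b)) := by
    funext a b
    simp only [Prod.Lex.toLex_lt_toLex]
    by_cases h1 : k1 a < k1 b
    · simp [h1]; try omega
    · by_cases h2 : k1 b < k1 a
      · simp [h1, h2]; try omega
      · by_cases h3 : k2 a < k2 b <;> simp [h1, h2, h3] <;> try omega
  rw [hfn]

lemma main_eq (values : List String) (hpre : Pre_sta values) :
    sta values = sta_alt values := by
  have hLv : ∀ a ∈ PySem.Set.ofList values, a ∈ values :=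
    fun a ha => (PySem.Set.mem_ofList _ _).mp ha
  have Hiff : ∀ a ∈ PySem.Set.ofList values, ∀ b ∈ PySem.Set.ofList values,
      (pcond (fun k => (values.count k : Int)) a b = true
        ↔ pkey (fun k => (values.count k : Int)) a < pkey (fun k => (values.count k : Int)) b) := by
    intro a ha b hb
    rw [pkey_lt_iff]
    unfold pcond
    simp only [Bool.or_eq_true, Bool.and_eq_true, decide_eq_true_eq]
    have hhigh : ((values.count a : Int) = (values.count b : Int)) →
        (higherThan a b = some 0 ↔ fnd a < fnd b) := by
      intro heq
      rw [higherThan_iff]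
      by_cases hab : a = b
      · subst hab; constructor
        · rintro ⟨_, _, h⟩; exact h
        · intro h; omega
      · have hcnt : values.count a = values.count b := by exact_mod_cast heq
        obtain ⟨h1, h2, _⟩ := hpre a (hLv a ha) b (hLv b hb) hab hcnt
        unfold fnd
        constructor
        · rintro ⟨_, _, h⟩; exact h
        · intro h; exact ⟨h1, h2, h⟩
    constructor
    · rintro (h | ⟨heq, hh⟩)
      · exact Or.inl h
      · exact Or.inr ⟨heq, (hhigh heq).mp hh⟩
    · rintro (h | ⟨heq, hh⟩)
      · exact Or.inl h
      · exact Or.inr ⟨heq, (hhigh heq).mpr hh⟩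
  have Hinj : ∀ a ∈ PySem.Set.ofList values, ∀ b ∈ PySem.Set.ofList values,
      pkey (fun k => (values.count k : Int)) a = pkey (fun k => (values.count k : Int)) b → a = b := by
    intro a ha b hb he
    by_contra hab
    have h' : (((values.count a : Int), fnd a) : Int × Int) = ((values.count b : Int), fnd b) := by
      simpa [pkey] using congrArg ofLex he
    have hcnt : values.count a = values.count b := by
      have h1 := congrArg Prod.fst h'; simp at h1; exact_mod_cast h1
    obtain ⟨_, _, hne⟩ := hpre a (hLv a ha) b (hLv b hb) hab hcnt
    have h2 := congrArg Prod.snd h'; simp at h2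
    exact hne h2
  -- A side
  rw [sta_eq]
  -- B side
  have hBdef : sta_alt values
      = ((PySem.List.sorted2 (PySem.Dict.counter values).items (fun kv => -kv.2)
            (fun kv => -(PySem.Str.find "23456789TJQKA" kv.1)) false).map (fun kv => kv.1),
         (PySem.List.sorted2 (PySem.Dict.counter values).items (fun kv => -kv.2)
            (fun kv => -(PySem.Str.find "23456789TJQKA" kv.1)) false).map (fun kv => kv.2)) := rfl
  rw [hBdef, PySem.Dict.items_counter, sorted2_eq_sorted_lex]
  have hperm : ((ssort (fun k => (values.count k : Int)) (PySem.Set.ofList values)).map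
        (fun k => (k, (values.count k : Int)))).Perm
      ((PySem.Set.ofList values).map (fun k => (k, (values.count k : Int)))) :=
    (ssort_perm _ (PySem.Set.ofList values).length _ rfl).map _
  have hpair : ((ssort (fun k => (values.count k : Int)) (PySem.Set.ofList values)).map
        (fun k => (k, (values.count k : Int)))).Pairwise
      (fun a b => (fun x => (toLex (-x.2, -(PySem.Str.find "23456789TJQKA" x.1)) : Int ×ₗ Int)) a
                < (fun x => (toLex (-x.2, -(PySem.Str.find "23456789TJQKA" x.1)) : Int ×ₗ Int)) b) := by
    rw [List.pairwise_map]
    refine (ssort_pairwise _ _ Hiff Hinj (PySem.Set.ofList values).length _ rfl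
      (fun z hz => hz) (PySem.Set.nodup_ofList _)).imp ?_
    intro a b h
    exact (keyflip (fun k => (values.count k : Int)) a b).mpr h
  have hEq : PySem.List.sorted
        ((PySem.Set.ofList values).map (fun k => (k, (values.count k : Int))))
        (fun x => (toLex (-x.2, -(PySem.Str.find "23456789TJQKA" x.1)) : Int ×ₗ Int)) false
      = (ssort (fun k => (values.count k : Int)) (PySem.Set.ofList values)).map
          (fun k => (k, (values.count k : Int))) :=
    PySem.List.sorted_eq_of_perm_of_pairwise_lt _ _ _ hperm hpair
  rw [hEq]
  simp [List.map_map, Function.comp_def]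
-- ===== VERDICT (by name: the statement is the Claim_ definition above) =====
theorem sta_spec : Claim_equal_sta := by
  intro values _ hpre
  unfold Spec_sta
  exact main_eq values hpre
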